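-- pv_equiv track=rewrite | github.com/jjdominguez79/Gest2Pdf | main.py | _ranges_from_cuts
-- ===== SOURCE A (Python) =====
-- def _ranges_from_cuts(cut_after, total_pages: int):
--     ranges = []
--     start = 1
--     for idx, cut in enumerate(cut_after, start=1):
--         if cut:
--             ranges.append((start, idx))
--             start = idx + 1
--     if start <= total_pages:
--         ranges.append((start, total_pages))
--     return ranges
-- ===== SOURCE B (Python) =====
-- def _ranges_from_cuts(cut_after, total_pages: int):
--     cuts = [i for i, c in enumerate(cut_after, start=1) if c]
--     starts = [1] + [p + 1 for p in cuts]
--     ends = cuts + [total_pages]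
--     pairs = list(zip(starts, ends))
--     if pairs[-1][0] > total_pages:
--         pairs.pop()
--     return pairs
-- ===== Notes on version B (the rewrite author's own statement) =====
-- stated objective: alternative
-- what changed: B replaces A's fused accumulator loop by a boundary decomposition: it collects the 1-indexed cut positions once, zips the parallel lists of range starts and ends, and drops the final pair when its start exceeds total_pages.
import Mathlib
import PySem

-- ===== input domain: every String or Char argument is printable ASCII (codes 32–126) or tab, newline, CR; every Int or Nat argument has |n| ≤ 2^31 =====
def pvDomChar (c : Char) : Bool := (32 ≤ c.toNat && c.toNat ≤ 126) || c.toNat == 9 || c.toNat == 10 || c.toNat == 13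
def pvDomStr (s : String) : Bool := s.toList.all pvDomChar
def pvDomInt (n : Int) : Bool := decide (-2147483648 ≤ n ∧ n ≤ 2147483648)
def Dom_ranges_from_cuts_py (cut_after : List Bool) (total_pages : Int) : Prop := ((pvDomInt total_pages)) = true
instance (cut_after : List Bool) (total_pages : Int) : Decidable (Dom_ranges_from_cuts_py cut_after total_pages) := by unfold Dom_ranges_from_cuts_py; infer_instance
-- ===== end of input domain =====

-- B rebuilds the same page ranges by a boundary decomposition (collect cut positions, zip starts with ends,
-- drop the final pair when its start exceeds total_pages) instead of A's fused accumulator loop; objective: alternative.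
-- ===== PORT A =====
-- A's for-loop over enumerate(cut_after, start=1) as structural recursion on the same state (ranges, start)
def rfcA_loop (l : List Bool) (idx : Int) (ranges : List (Int × Int)) (start : Int) : List (Int × Int) × Int :=
  match l with
  | [] => (ranges, start)
  | c :: t =>
    if c then rfcA_loop t (idx + 1) (ranges ++ [(start, idx)]) (idx + 1)
    else rfcA_loop t (idx + 1) ranges start

def ranges_from_cuts_py (cut_after : List Bool) (total_pages : Int) : List (Int × Int) :=
  let st := rfcA_loop cut_after 1 [] 1
  if st.2 ≤ total_pages then st.1 ++ [(st.2, total_pages)] else st.1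

-- ===== PORT B =====
-- B's comprehension: the 1-indexed positions where the flag is true
def rfcB_cuts (l : List Bool) (idx : Int) : List Int :=
  match l with
  | [] => []
  | c :: t => if c then idx :: rfcB_cuts t (idx + 1) else rfcB_cuts t (idx + 1)

def ranges_from_cuts_py_alt (cut_after : List Bool) (total_pages : Int) : List (Int × Int) :=
  let cuts := rfcB_cuts cut_after 1
  let starts := 1 :: cuts.map (· + 1)
  let ends := cuts ++ [total_pages]
  let pairs := starts.zip ends
  match pairs.getLast? with          -- pairs[-1]; pairs is always nonempty
  | some last => if last.1 > total_pages then pairs.dropLast else pairs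
  | none => pairs

-- ===== PRECONDITION & SPEC =====
def Spec_ranges_from_cuts_py (cut_after : List Bool) (total_pages : Int) (out : List (Int × Int)) : Prop := out = ranges_from_cuts_py_alt cut_after total_pages
instance (cut_after : List Bool) (total_pages : Int) (out : List (Int × Int)) : Decidable (Spec_ranges_from_cuts_py cut_after total_pages out) := by unfold Spec_ranges_from_cuts_py; infer_instance

-- ===== CLAIM (what is proved, stated in full; the proofs are below) =====
def Claim_equal_ranges_from_cuts_py : Prop := ∀ (cut_after : List Bool) (total_pages : Int), Dom_ranges_from_cuts_py cut_after total_pages → Spec_ranges_from_cuts_py cut_after total_pages (ranges_from_cuts_py cut_after total_pages)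

-- ===== LEMMAS AND PROOFS =====

-- the start of the final (possibly suppressed) range, given start s and the cut positions
def rfcLast (s : Int) : List Int → Int
  | [] => s
  | x :: t => rfcLast (x + 1) t

theorem rfcA_loop_eq (l : List Bool) (idx : Int) (ranges : List (Int × Int)) (start : Int) :
    rfcA_loop l idx ranges start =
      (ranges ++ (start :: (rfcB_cuts l idx).map (· + 1)).zip (rfcB_cuts l idx),
       rfcLast start (rfcB_cuts l idx)) := by
  induction l generalizing idx ranges start with
  | nil => simp [rfcA_loop, rfcB_cuts, rfcLast]
  | cons c t ih =>
    by_cases hc : c = true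
    · simp [rfcA_loop, rfcB_cuts, hc, ih, rfcLast, List.zip]
    · simp at hc
      simp [rfcA_loop, rfcB_cuts, hc, ih]

theorem rfc_zip_concat (s : Int) (c : List Int) (tp : Int) :
    (s :: c.map (· + 1)).zip (c ++ [tp]) =
      (s :: c.map (· + 1)).zip c ++ [(rfcLast s c, tp)] := by
  induction c generalizing s with
  | nil => simp [rfcLast]
  | cons x t ih =>
    simp only [List.map_cons, List.cons_append, List.zip_cons_cons, rfcLast, ih]

-- ===== VERDICT (by name: the statement is the Claim_ definition above) =====
theorem ranges_from_cuts_py_spec : Claim_equal_ranges_from_cuts_py := by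
  intro cut_after total_pages _
  show ranges_from_cuts_py cut_after total_pages = ranges_from_cuts_py_alt cut_after total_pages
  unfold ranges_from_cuts_py ranges_from_cuts_py_alt
  simp only [rfcA_loop_eq, rfc_zip_concat, List.nil_append, List.getLast?_concat,
    List.dropLast_concat]
  by_cases h : rfcLast 1 (rfcB_cuts cut_after 1) ≤ total_pages
  · simp [h, not_lt.mpr h]
  · simp [h, lt_of_not_ge h]
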